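-- pv_equiv track=rewrite | github.com/sanket-profile/Lattice-paths-problem-15 | euler.py | newpath
-- ===== SOURCE A (Python) =====
-- def newneighbours(a):
-- 	if a[0] > 0 and a[1] > 0 :
-- 		neighbour = [(a[0] - 1 , a[1]) , (a[0] , a[1] - 1)]
-- 	elif a[0] == 0 and a[1] > 0:
-- 		neighbour = [(a[0] , a[1] - 1)]
-- 	elif a[0] > 0 and a[1] == 0:
-- 		neighbour = [(a[0] - 1 , a[1])]
-- 	elif a[0] == 0 and a[1] == 0:
-- 		neighbour = []
-- 	else:
-- 		pass
-- 	return(neighbour)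
--
-- def newpath(a ,n):
-- 	d = {}
-- 	for i in range(0 , n+1):
-- 		for j in range(0, n+1):
-- 			if i==0 and j ==0 :
-- 				d[str((0,0))] = 1
-- 			else:
-- 				neighbour = newneighbours((i , j))
-- 				if len(neighbour) >1:
-- 					d[str((i , j))] = d[str(neighbour[0])] + d[str(neighbour[1])]
-- 				else:
-- 					d[str((i , j))]  = d[str(neighbour[0])]
-- 	return(d[str((n , n))])
-- ===== SOURCE B (Python) =====
-- def newpath(a, n):
--     # number of monotone lattice paths to (n, n) = C(2n, n), computed as a
--     # running product: after step k, r = C(n+k, k); division is always exact.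
--     r = 1
--     for k in range(1, n + 1):
--         r = r * (n + k) // k
--     return r
-- ===== Notes on version B (the rewrite author's own statement) =====
-- stated objective: faster
-- what changed: Replaced the O(n^2) dynamic-programming grid of string-keyed dict entries by a single O(n) running product computing the binomial coefficient C(2n, n) directly.
import Mathlib
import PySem

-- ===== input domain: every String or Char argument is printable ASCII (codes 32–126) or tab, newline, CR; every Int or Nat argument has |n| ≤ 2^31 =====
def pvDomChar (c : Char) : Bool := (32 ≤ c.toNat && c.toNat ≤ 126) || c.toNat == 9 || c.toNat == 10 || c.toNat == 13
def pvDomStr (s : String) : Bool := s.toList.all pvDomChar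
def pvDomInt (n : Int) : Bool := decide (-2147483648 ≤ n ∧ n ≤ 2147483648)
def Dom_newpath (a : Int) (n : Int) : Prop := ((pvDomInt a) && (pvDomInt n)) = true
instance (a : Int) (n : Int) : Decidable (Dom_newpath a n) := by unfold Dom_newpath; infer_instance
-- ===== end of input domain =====

-- B replaces A's O(n^2) string-keyed DP grid by the O(n) running product for C(2n, n) (objective: faster).

-- ===== PORT A =====
-- helper newneighbours(a); the Python 'else: pass' branch (some coordinate negative) would raise
-- UnboundLocalError and is never reached from newpath's loops; we return [] there.
def newneighboursA (a : Int × Int) : List (Int × Int) :=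
  if a.1 > 0 ∧ a.2 > 0 then [(a.1 - 1, a.2), (a.1, a.2 - 1)]
  else if a.1 = 0 ∧ a.2 > 0 then [(a.1, a.2 - 1)]
  else if a.1 > 0 ∧ a.2 = 0 then [(a.1 - 1, a.2)]
  else []

-- str((i, j)) = "(i, j)", built from the exact character list of Python's str
def pyKey (p : Int × Int) : String :=
  String.ofList ('(' :: PySem.Int.toChars p.1 ++ ',' :: ' ' :: PySem.Int.toChars p.2 ++ [')'])

-- the dict {} is ported as a string-keyed hash map (only insert-with-overwrite and lookup are
-- used, never iteration order, so it is exact for Python's dict here);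
-- one iteration of the inner loop body; d[str(neighbour[k])] is ported as getD: inside the loops
-- (i, j ≥ 0, not both 0) the neighbour list is nonempty and its keys are present, so the defaults
-- (0, 0) / 0 are never consulted (Python would raise IndexError/KeyError there)
def newpathCell (d : Std.HashMap String Int) (i j : Int) : Std.HashMap String Int :=
  if i = 0 ∧ j = 0 then d.insert (pyKey (0, 0)) 1
  else
    let neighbour := newneighboursA (i, j)
    if 1 < neighbour.length then
      d.insert (pyKey (i, j))
        (d.getD (pyKey (neighbour.getD 0 (0, 0))) 0 + d.getD (pyKey (neighbour.getD 1 (0, 0))) 0)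
    else
      d.insert (pyKey (i, j)) (d.getD (pyKey (neighbour.getD 0 (0, 0))) 0)

def newpath (a : Int) (n : Int) : Int :=
  let d := (PySem.List.pyRange 0 (n + 1)).foldl
    (fun d i => (PySem.List.pyRange 0 (n + 1)).foldl (fun d j => newpathCell d i j) d)
    Std.HashMap.emptyWithCapacity
  -- d[str((n, n))]: the key is present for n ≥ 0 (Pre_); for n < 0 Python raises KeyError
  d.getD (pyKey (n, n)) 0

-- ===== PORT B =====
def newpath_alt (a : Int) (n : Int) : Int :=
  (PySem.List.pyRange 1 (n + 1)).foldl (fun r k => PySem.Int.floordiv (r * (n + k)) k) 1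

-- ===== PRECONDITION & SPEC =====
-- Pre_ excludes n < 0, on which A raises KeyError (d[str((n, n))] on an empty dict)
def Pre_newpath (a : Int) (n : Int) : Prop := 0 ≤ n
instance (a : Int) (n : Int) : Decidable (Pre_newpath a n) := by unfold Pre_newpath; infer_instance
def pvWitness_newpath : Int × Int := (0, 3)

def Spec_newpath (a : Int) (n : Int) (out : Int) : Prop := out = newpath_alt a n
instance (a : Int) (n : Int) (out : Int) : Decidable (Spec_newpath a n out) := by unfold Spec_newpath; infer_instance

-- ===== CLAIM (what is proved, stated in full; the proofs are below) =====
def Claim_equal_newpath : Prop := ∀ (a : Int) (n : Int), Dom_newpath a n → Pre_newpath a n → Spec_newpath a n (newpath a n)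

-- ===== LEMMAS AND PROOFS =====

-- decimal digit characters are injective and are never ','
theorem digitChar_lt10_inj (a b : Nat) (ha : a < 10) (hb : b < 10)
    (h : Nat.digitChar a = Nat.digitChar b) : a = b := by
  have : ∀ x y : Fin 10, Nat.digitChar x = Nat.digitChar y → x = y := by decide
  have := this ⟨a, ha⟩ ⟨b, hb⟩ h
  simpa [Fin.ext_iff] using this

theorem digitChar_ne_comma (a : Nat) (ha : a < 10) : Nat.digitChar a ≠ ',' := by
  have : ∀ x : Fin 10, Nat.digitChar x ≠ ',' := by decide
  exact this ⟨a, ha⟩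

-- Nat.toDigits 10 in terms of Nat.digits
theorem toDigitsCore_eq_digits (f : Nat) : ∀ n l, 0 < n → n < f →
    Nat.toDigitsCore 10 f n l = ((Nat.digits 10 n).map Nat.digitChar).reverse ++ l := by
  induction f with
  | zero => intro n l h1 h2; omega
  | succ f ih =>
    intro n l h1 h2
    rw [Nat.toDigitsCore]
    by_cases hd : n / 10 = 0
    · have hn10 : n < 10 := by omega
      rw [Nat.digits_def' (by norm_num) h1]
      have : Nat.digits 10 (n / 10) = [] := by simp [hd]
      simp [hd]
    · have h10 : 0 < n / 10 := Nat.pos_of_ne_zero hd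
      have hlt : n / 10 < f := by
        have := Nat.div_lt_self h1 (by norm_num : 1 < 10)
        omega
      simp only [hd, if_false]
      rw [ih (n / 10) _ h10 hlt, Nat.digits_def' (by norm_num) h1]
      simp

theorem toDigits10_pos (n : Nat) (h : 0 < n) :
    Nat.toDigits 10 n = ((Nat.digits 10 n).map Nat.digitChar).reverse := by
  have := toDigitsCore_eq_digits (n + 1) n [] h (by omega)
  simpa [Nat.toDigits] using this

theorem toDigits10_inj (m n : Nat) (h : Nat.toDigits 10 m = Nat.toDigits 10 n) : m = n := by
  have key : ∀ k : Nat, 0 < k → Nat.toDigits 10 k ≠ ['0'] := by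
    intro k hk hbad
    rw [toDigits10_pos k hk] at hbad
    have : (Nat.digits 10 k).map Nat.digitChar = ['0'] := by
      have := congrArg List.reverse hbad; simpa using this
    obtain ⟨d, hd1, hd2⟩ : ∃ d, Nat.digits 10 k = [d] ∧ Nat.digitChar d = '0' := by
      rcases hdig : Nat.digits 10 k with _ | ⟨d, rest⟩
      · rw [hdig] at this; simp at this
      · rw [hdig] at this
        simp at this
        exact ⟨d, by simp [this.2], this.1⟩
    have hdlt : d < 10 := Nat.digits_lt_base (by norm_num) (hd1 ▸ List.mem_singleton.mpr rfl)
    have hd0 : d = 0 := digitChar_lt10_inj d 0 hdlt (by norm_num) (by simpa using hd2)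
    have : k = 0 := by
      have := Nat.ofDigits_digits 10 k
      rw [hd1, hd0] at this; simpa using this.symm
    omega
  rcases Nat.eq_zero_or_pos m with hm | hm
  · rcases Nat.eq_zero_or_pos n with hn | hn
    · omega
    · exfalso; exact key n hn (by rw [← h, hm]; rfl)
  · rcases Nat.eq_zero_or_pos n with hn | hn
    · exfalso; exact key m hm (by rw [h, hn]; rfl)
    · rw [toDigits10_pos m hm, toDigits10_pos n hn] at h
      have h2 : (Nat.digits 10 m).map Nat.digitChar = (Nat.digits 10 n).map Nat.digitChar := by
        have := congrArg List.reverse h; simpa using this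
      have hdig : Nat.digits 10 m = Nat.digits 10 n := by
        have inj : ∀ (xs ys : List Nat), (∀ x ∈ xs, x < 10) → (∀ y ∈ ys, y < 10) →
            xs.map Nat.digitChar = ys.map Nat.digitChar → xs = ys := by
          intro xs
          induction xs with
          | nil => intro ys _ _ hmap; cases ys <;> simp_all
          | cons x xs ihx =>
            intro ys hx hy hmap
            cases ys with
            | nil => simp at hmap
            | cons y ys =>
              simp only [List.map_cons, List.cons.injEq] at hmap
              have hxy : x = y :=
                digitChar_lt10_inj x y (hx x (by simp)) (hy y (by simp)) hmap.1
              have := ihx ys (fun a ha => hx a (by simp [ha])) (fun a ha => hy a (by simp [ha])) hmap.2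
              simp [hxy, this]
        exact inj _ _ (fun x hx => Nat.digits_lt_base (by norm_num) hx)
          (fun y hy => Nat.digits_lt_base (by norm_num) hy) h2
      have := congrArg (Nat.ofDigits 10) hdig
      simpa [Nat.ofDigits_digits] using this

theorem comma_not_mem_toDigits10 (n : Nat) : ',' ∉ Nat.toDigits 10 n := by
  rcases Nat.eq_zero_or_pos n with h | h
  · subst h; decide
  · rw [toDigits10_pos n h]
    intro hmem
    simp only [List.mem_reverse, List.mem_map] at hmem
    obtain ⟨d, hd, hchar⟩ := hmem
    exact digitChar_ne_comma d (Nat.digits_lt_base (by norm_num) hd) hchar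

theorem toChars_natCast (p : Nat) : PySem.Int.toChars (p : Int) = Nat.toDigits 10 p := by
  simp [PySem.Int.toChars]

theorem split_at_comma (A1 : List Char) : ∀ (A2 X1 X2 : List Char), ',' ∉ A1 → ',' ∉ A2 →
    A1 ++ ',' :: X1 = A2 ++ ',' :: X2 → A1 = A2 ∧ X1 = X2 := by
  induction A1 with
  | nil =>
    intro A2 X1 X2 _ h2 h
    cases A2 with
    | nil => simpa using h
    | cons c A2 =>
      simp only [List.nil_append, List.cons_append, List.cons.injEq] at h
      exact (h2 (by simp [← h.1])).elim
  | cons c A1 ih =>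
    intro A2 X1 X2 h1 h2 h
    cases A2 with
    | nil =>
      simp only [List.nil_append, List.cons_append, List.cons.injEq] at h
      exact (h1 (by simp [h.1])).elim
    | cons c' A2 =>
      simp only [List.cons_append, List.cons.injEq] at h
      obtain ⟨rfl, h⟩ := h
      have := ih A2 X1 X2 (fun hm => h1 (List.mem_cons_of_mem _ hm))
        (fun hm => h2 (List.mem_cons_of_mem _ hm)) h
      simp [this]

theorem pyKey_inj (p q p' q' : Nat)
    (h : pyKey ((p : Int), (q : Int)) = pyKey ((p' : Int), (q' : Int))) : p = p' ∧ q = q' := by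
  have h : ('(' :: PySem.Int.toChars (p : Int) ++ ',' :: ' ' :: PySem.Int.toChars (q : Int) ++ [')'])
      = ('(' :: PySem.Int.toChars (p' : Int) ++ ',' :: ' ' :: PySem.Int.toChars (q' : Int) ++ [')']) := by
    have h2 := congrArg String.toList h
    simpa [pyKey] using h2
  simp only [toChars_natCast, List.cons_append, List.append_assoc] at h
  rw [List.cons.injEq] at h
  have hsplit := split_at_comma _ _ _ _ (comma_not_mem_toDigits10 p)
    (comma_not_mem_toDigits10 p') h.2
  obtain ⟨hp, hq⟩ := hsplit
  have hp' := toDigits10_inj _ _ hp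
  simp only [List.cons.injEq, true_and] at hq
  have := List.append_inj' hq (by simp)
  exact ⟨hp', toDigits10_inj _ _ this.1⟩

-- number of monotone paths from (0,0) to (p,q): C(p+q, p)
def pathsVal (p q : Nat) : Int := ((p + q).choose p : Int)

-- invariant of A's grid loop: all cells of the first i full rows and the first j
-- cells of row i are stored, each with its path count
def InvA (N i j : Nat) (d : Std.HashMap String Int) : Prop :=
  ∀ p q : Nat, (p < i ∧ q ≤ N) ∨ (p = i ∧ q < j) →
    d.getD (pyKey ((p : Int), (q : Int))) 0 = pathsVal p q

theorem cell_eq (N i j : Nat) (hj : j ≤ N) (d : Std.HashMap String Int)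
    (h : InvA N i j d) :
    newpathCell d ↑i ↑j = d.insert (pyKey ((i : Int), (j : Int))) (pathsVal i j) := by
  unfold newpathCell
  rcases Nat.eq_zero_or_pos i with hi0 | hi0 <;> rcases Nat.eq_zero_or_pos j with hj0 | hj0
  · subst hi0; subst hj0; simp [pathsVal]
  · -- i = 0, j > 0
    subst hi0
    simp only [Nat.cast_zero]
    rw [if_neg (by omega)]
    have hnb : newneighboursA ((0 : Int), (j : Int)) = [((0 : Int), (j : Int) - 1)] := by
      simp only [newneighboursA]
      rw [if_neg (by simp), if_pos (by constructor <;> [simp; exact_mod_cast hj0])]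
    rw [hnb]
    simp only [List.length_singleton, List.getD, List.getElem?_cons_zero, Option.getD_some]
    rw [if_neg (by omega)]
    have hc : ((j : Int) - 1) = ((j - 1 : Nat) : Int) := by omega
    have hlook := h 0 (j - 1) (Or.inr ⟨rfl, by omega⟩)
    simp only [Nat.cast_zero] at hlook
    rw [hc, hlook]
    simp [pathsVal]
  · -- i > 0, j = 0
    subst hj0
    simp only [Nat.cast_zero]
    rw [if_neg (by omega)]
    have hnb : newneighboursA ((i : Int), (0 : Int)) = [((i : Int) - 1, (0 : Int))] := by
      simp only [newneighboursA]
      rw [if_neg (by simp), if_neg (by push_cast; omega),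
        if_pos (by constructor <;> [exact_mod_cast hi0; simp])]
    rw [hnb]
    simp only [List.length_singleton, List.getD, List.getElem?_cons_zero, Option.getD_some]
    rw [if_neg (by omega)]
    have hc : ((i : Int) - 1) = ((i - 1 : Nat) : Int) := by omega
    have hlook := h (i - 1) 0 (Or.inl ⟨by omega, by omega⟩)
    simp only [Nat.cast_zero] at hlook
    rw [hc, hlook]
    simp [pathsVal]
  · -- i > 0, j > 0
    rw [if_neg (by omega)]
    have hnb : newneighboursA ((i : Int), (j : Int)) =
        [((i : Int) - 1, (j : Int)), ((i : Int), (j : Int) - 1)] := by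
      simp only [newneighboursA]
      rw [if_pos (by constructor <;> [exact_mod_cast hi0; exact_mod_cast hj0])]
    rw [hnb]
    simp only [List.length_cons, List.getD, List.getElem?_cons_zero,
      List.getElem?_cons_succ, Option.getD_some]
    rw [if_pos (by omega)]
    have hci : ((i : Int) - 1) = ((i - 1 : Nat) : Int) := by omega
    have hcj : ((j : Int) - 1) = ((j - 1 : Nat) : Int) := by omega
    rw [hci, hcj, h (i - 1) j (Or.inl ⟨by omega, hj⟩), h i (j - 1) (Or.inr ⟨rfl, by omega⟩)]
    congr 1
    -- Pascal's rule
    obtain ⟨a, rfl⟩ : ∃ a, i = a + 1 := ⟨i - 1, by omega⟩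
    obtain ⟨b, rfl⟩ : ∃ b, j = b + 1 := ⟨j - 1, by omega⟩
    simp only [pathsVal, Nat.add_sub_cancel]
    have key : (a + (b + 1)).choose a + (a + 1 + b).choose (a + 1)
        = (a + 1 + (b + 1)).choose (a + 1) := by
      have e1 : (a + (b + 1)).choose a = (a + b + 1).choose a := by
        rw [show a + (b + 1) = a + b + 1 from by ring]
      have e2 : (a + 1 + b).choose (a + 1) = (a + b + 1).choose (a + 1) := by
        rw [show a + 1 + b = a + b + 1 from by ring]
      have e3 : (a + 1 + (b + 1)).choose (a + 1) = (a + b + 1 + 1).choose (a + 1) := by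
        rw [show a + 1 + (b + 1) = a + b + 1 + 1 from by ring]
      rw [e1, e2, e3]
      conv_rhs => rw [Nat.choose_succ_succ]
    exact_mod_cast key

theorem cell_step (N i j : Nat) (hj : j ≤ N) (d : Std.HashMap String Int)
    (h : InvA N i j d) : InvA N i (j + 1) (newpathCell d ↑i ↑j) := by
  rw [cell_eq N i j hj d h]
  intro p q hpq
  rw [Std.HashMap.getD_insert]
  by_cases hk : pyKey ((i : Int), (j : Int)) = pyKey ((p : Int), (q : Int))
  · obtain ⟨rfl, rfl⟩ := pyKey_inj _ _ _ _ hk.symm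
    simp
  · rw [if_neg (by simpa using hk)]
    apply h
    rcases hpq with hl | ⟨rfl, hq⟩
    · exact Or.inl hl
    · have hne : q ≠ j := fun hq' => hk (by rw [hq'])
      exact Or.inr ⟨rfl, by omega⟩

theorem row_fold (N i : Nat) (d : Std.HashMap String Int) (h : InvA N i 0 d) :
    ∀ j, j ≤ N + 1 →
      InvA N i j (((List.range j).map (fun (k : Nat) => (k : Int))).foldl
        (fun d k => newpathCell d ↑i k) d) := by
  intro j
  induction j with
  | zero => intro _; simpa using h
  | succ j ih =>
    intro hj
    rw [List.range_succ, List.map_append, List.foldl_append]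
    simp only [List.map_cons, List.map_nil, List.foldl_cons, List.foldl_nil]
    exact cell_step N i j (by omega) _ (ih (by omega))

theorem outer_fold (N : Nat) :
    ∀ i, i ≤ N + 1 →
      InvA N i 0 (((List.range i).map (fun (k : Nat) => (k : Int))).foldl
        (fun d k => ((List.range (N + 1)).map (fun (k : Nat) => (k : Int))).foldl
          (fun d j => newpathCell d k j) d)
        Std.HashMap.emptyWithCapacity) := by
  intro i
  induction i with
  | zero => intro _ p q hpq; omega
  | succ i ih =>
    intro hi
    rw [show List.range (i + 1) = List.range i ++ [i] from List.range_succ,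
      List.map_append, List.foldl_append]
    simp only [List.map_cons, List.map_nil, List.foldl_cons, List.foldl_nil]
    have hrow := row_fold N i _ (ih (by omega)) (N + 1) (le_refl _)
    intro p q hpq
    apply hrow
    rcases hpq with ⟨hp, hq⟩ | ⟨_, hq⟩
    · rcases Nat.lt_succ_iff_lt_or_eq.mp hp with hp' | rfl
      · exact Or.inl ⟨hp', hq⟩
      · exact Or.inr ⟨rfl, by omega⟩
    · omega

-- A computes C(2N, N)
theorem newpath_eq_choose (a : Int) (N : Nat) :
    newpath a (N : Int) = ((N + N).choose N : Int) := by
  have hcast : ((N : Int) + 1) = ((N + 1 : Nat) : Int) := by push_cast; ring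
  have hfin := outer_fold N (N + 1) (le_refl _)
  simp only [newpath, hcast, PySem.List.pyRange_zero_natCast]
  rw [hfin N N (Or.inl ⟨by omega, by omega⟩)]
  simp [pathsVal]

-- B's running product: after k steps r = C(N + k, k)
theorem b_prefix (N : Nat) : ∀ k : Nat,
    (PySem.List.pyRange 1 ((k : Int) + 1)).foldl
      (fun r m => PySem.Int.floordiv (r * ((N : Int) + m)) m) 1 = ((N + k).choose k : Int) := by
  intro k
  induction k with
  | zero =>
    have h0 : PySem.List.pyRange 1 1 = [] := by decide
    simp [h0]
  | succ k ih =>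
    rw [show ((k + 1 : Nat) : Int) = (k : Int) + 1 from by push_cast; ring,
      PySem.List.pyRange_one_succ_right (by omega), List.foldl_append]
    simp only [List.foldl_cons, List.foldl_nil]
    rw [ih]
    have hnat : (N + k).choose k * (N + k + 1) = (N + (k + 1)).choose (k + 1) * (k + 1) := by
      have hs := Nat.add_one_mul_choose_eq (N + k) k
      calc (N + k).choose k * (N + k + 1) = (N + k + 1) * (N + k).choose k := by ring
        _ = (N + k + 1).choose (k + 1) * (k + 1) := hs
        _ = (N + (k + 1)).choose (k + 1) * (k + 1) := by
            rw [show N + (k + 1) = N + k + 1 from by ring]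
    have hZ : ((N + k).choose k : Int) * ((N : Int) + ((k : Int) + 1))
        = ((N + (k + 1)).choose (k + 1) : Int) * ((k : Int) + 1) := by
      exact_mod_cast hnat
    rw [PySem.Int.floordiv_eq_ediv_of_pos (by omega), hZ,
      Int.mul_ediv_cancel _ (by omega)]

theorem newpath_alt_eq_choose (a : Int) (N : Nat) :
    newpath_alt a (N : Int) = ((N + N).choose N : Int) := by
  have h := b_prefix N N
  simpa [newpath_alt] using h

-- ===== VERDICT (by name: the statement is the Claim_ definition above) =====
theorem newpath_spec : Claim_equal_newpath := by
  intro a n _ hpre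
  unfold Spec_newpath
  have hN : n = ((n.toNat : Nat) : Int) := (Int.toNat_of_nonneg hpre).symm
  rw [hN, newpath_eq_choose, newpath_alt_eq_choose]
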